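-- pv_equiv track=rewrite | github.com/ZinumZ/Faculdade-Algoritmos-2 | RevisaoPython/Recursion/EX03.py | dif_lista
-- ===== SOURCE A (Python) =====
-- def dif_lista(lista):
--     soma_pos = 0
--     soma_neg = 0
--
--     for item in lista:
--         if item >= 0:
--             soma_pos = soma_pos + item
--         else:
--             soma_neg = soma_neg + item
--     return soma_pos - soma_neg
-- ===== SOURCE B (Python) =====
-- def dif_lista(lista):
--     # soma_pos - soma_neg == sum(lista) - 2*sum(negatives): two staged passes
--     # and an arithmetic identity instead of classifying into two accumulators.
--     total = sum(lista)
--     negativos = sum(x for x in lista if x < 0)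
--     return total - 2 * negativos
-- ===== Notes on version B (the rewrite author's own statement) =====
-- stated objective: alternative
-- what changed: Replaces the single classifying loop with two per-element accumulators by two staged passes (a plain sum and a filtered sum of the negatives) combined via the identity pos - neg = total - 2*neg.
import Mathlib
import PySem

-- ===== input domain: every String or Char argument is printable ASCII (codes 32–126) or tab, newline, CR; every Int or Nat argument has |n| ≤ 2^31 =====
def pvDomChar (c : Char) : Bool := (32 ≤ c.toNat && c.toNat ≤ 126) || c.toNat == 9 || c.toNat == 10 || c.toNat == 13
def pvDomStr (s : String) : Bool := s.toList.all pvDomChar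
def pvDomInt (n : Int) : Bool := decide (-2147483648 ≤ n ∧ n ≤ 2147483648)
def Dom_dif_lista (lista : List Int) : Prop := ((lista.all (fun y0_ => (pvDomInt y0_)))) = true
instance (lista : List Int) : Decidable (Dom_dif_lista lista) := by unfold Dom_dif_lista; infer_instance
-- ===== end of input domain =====

-- B replaces the classifying loop with two staged passes (total sum, sum of negatives)
-- combined via pos - neg = total - 2*neg; alternative decomposition, same cost.


-- ===== PORT A =====
-- A: one loop with two accumulators (soma_pos, soma_neg), returning their difference
def dif_lista (lista : List Int) : Int :=
  let r := lista.foldl (fun (s : Int × Int) item =>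
    if item ≥ 0 then (s.1 + item, s.2) else (s.1, s.2 + item)) (0, 0)
  r.1 - r.2

-- ===== PORT B =====
-- B: total = sum(lista); negativos = sum(x for x in lista if x < 0); total - 2*negativos
def dif_lista_alt (lista : List Int) : Int :=
  let total := lista.foldl (· + ·) 0
  let negativos := (lista.filter (fun x => x < 0)).foldl (· + ·) 0
  total - 2 * negativos

-- ===== PRECONDITION & SPEC =====
def Spec_dif_lista (lista : List Int) (out : Int) : Prop := out = dif_lista_alt lista
instance (lista : List Int) (out : Int) : Decidable (Spec_dif_lista lista out) := by unfold Spec_dif_lista; infer_instance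

-- ===== CLAIM (what is proved, stated in full; the proofs are below) =====
def Claim_equal_dif_lista : Prop := ∀ (lista : List Int), Dom_dif_lista lista → Spec_dif_lista lista (dif_lista lista)

-- ===== LEMMAS AND PROOFS =====
theorem pv_foldl_add_shift (xs : List Int) (a : Int) :
    xs.foldl (· + ·) a = a + xs.foldl (· + ·) 0 := by
  induction xs generalizing a with
  | nil => simp
  | cons x xs ih =>
    simp only [List.foldl]
    rw [ih (a + x), ih (0 + x)]
    ring

theorem pv_key (xs : List Int) (p n : Int) :
    (xs.foldl (fun (s : Int × Int) item =>
      if item ≥ 0 then (s.1 + item, s.2) else (s.1, s.2 + item)) (p, n)).1 -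
    (xs.foldl (fun (s : Int × Int) item =>
      if item ≥ 0 then (s.1 + item, s.2) else (s.1, s.2 + item)) (p, n)).2 =
    p - n + dif_lista_alt xs := by
  induction xs generalizing p n with
  | nil => simp [dif_lista_alt]
  | cons x xs ih =>
    simp only [List.foldl, List.filter, dif_lista_alt] at *
    by_cases hx : x ≥ 0
    · have hx' : ¬ decide (x < 0) = true := by simp; omega
      simp only [if_pos hx, hx', ih]
      rw [pv_foldl_add_shift xs (0 + x)]
      ring
    · have hx' : decide (x < 0) = true := by simp; omega
      simp only [if_neg hx, hx', ih, List.foldl_cons]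
      rw [pv_foldl_add_shift xs (0 + x),
        pv_foldl_add_shift (xs.filter (fun x => decide (x < 0))) (0 + x)]
      ring

-- ===== VERDICT (by name: the statement is the Claim_ definition above) =====
theorem dif_lista_spec : Claim_equal_dif_lista := by
  intro lista _
  unfold Spec_dif_lista dif_lista
  simpa using pv_key lista 0 0
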